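-- pv_equiv track=rewrite | github.com/yeseongcho/- | 프로그래밍1/hw10_p1-1.py | is_nextline
-- ===== SOURCE A (Python) =====
-- def is_nextline(x, y) :
--     i = len(x)
--     j = len(y)
--     x = 0
--     while True :
--         if i + j + x < 100 : # To make same space whether the word is long or not.
--             x += 1
--         else :
--             return x
-- ===== SOURCE B (Python) =====
-- def is_nextline(x, y):
--     return max(0, 100 - len(x) - len(y))
-- ===== Notes on version B (the rewrite author's own statement) =====
-- stated objective: simpler
-- what changed: Replaces the increment-until-100 while loop with the closed-form expression max(0, 100 - len(x) - len(y)).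
import Mathlib
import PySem

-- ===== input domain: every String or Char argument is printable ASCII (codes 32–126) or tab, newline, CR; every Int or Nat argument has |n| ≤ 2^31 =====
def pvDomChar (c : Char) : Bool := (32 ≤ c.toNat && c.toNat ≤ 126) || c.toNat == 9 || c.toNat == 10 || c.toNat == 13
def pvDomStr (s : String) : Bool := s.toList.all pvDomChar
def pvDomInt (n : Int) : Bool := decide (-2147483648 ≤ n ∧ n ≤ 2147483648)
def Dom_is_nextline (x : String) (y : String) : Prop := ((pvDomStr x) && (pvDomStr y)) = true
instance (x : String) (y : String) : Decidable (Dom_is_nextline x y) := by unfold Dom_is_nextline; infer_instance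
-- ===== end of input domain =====

-- B computes the answer in closed form instead of A's counting loop (objective: simpler).

-- ===== PORT A =====
-- the 'while True' loop: x starts at 0 and is incremented while i + j + x < 100
def is_nextline_loop (i : Int) (j : Int) (x : Int) : Int :=
  if i + j + x < 100 then is_nextline_loop i j (x + 1) else x
termination_by (100 - (i + j + x)).toNat
decreasing_by omega

def is_nextline (x : String) (y : String) : Int :=
  let i : Int := PySem.Str.len x
  let j : Int := PySem.Str.len y
  is_nextline_loop i j 0

-- ===== PORT B =====
def is_nextline_alt (x : String) (y : String) : Int :=
  max 0 (100 - PySem.Str.len x - PySem.Str.len y)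

-- ===== PRECONDITION & SPEC =====
def Spec_is_nextline (x : String) (y : String) (out : Int) : Prop := out = is_nextline_alt x y
instance (x : String) (y : String) (out : Int) : Decidable (Spec_is_nextline x y out) := by unfold Spec_is_nextline; infer_instance

-- ===== CLAIM (what is proved, stated in full; the proofs are below) =====
def Claim_equal_is_nextline : Prop := ∀ (x : String) (y : String), Dom_is_nextline x y → Spec_is_nextline x y (is_nextline x y)

-- ===== LEMMAS AND PROOFS =====
theorem is_nextline_loop_eq (i j x : Int) : is_nextline_loop i j x = max x (100 - i - j) := by
  fun_induction is_nextline_loop with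
  | case1 x h ih => rw [ih]; omega
  | case2 x h => omega

-- ===== VERDICT (by name: the statement is the Claim_ definition above) =====
theorem is_nextline_spec : Claim_equal_is_nextline := by
  intro x y _
  show _ = _
  simp [is_nextline, is_nextline_alt, is_nextline_loop_eq]
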